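-- pv_equiv track=rewrite | github.com/ShashankChandgude/Conway-s-Game-of-Life-with-TDD | src/game_of_life.py | simulate_until_extinction
-- ===== SOURCE A (Python) =====
-- from enum import Enum
--
-- class CellState(Enum):
--     ALIVE = 1
--     DEAD = 0
--
-- def next_state(current_state, number_of_life_neighbors):
--     return CellState.ALIVE if number_of_life_neighbors == 3 or (current_state == CellState.ALIVE and number_of_life_neighbors == 2) else CellState.DEAD
--
-- def generate_signals_for_a_cell(cell):
--     x, y = cell
--     directions = [(-1, -1), (-1, 0), (-1, 1), (0, -1), (0, 1), (1, -1), (1, 0), (1, 1)]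
--
--     return [(x + dx, y + dy) for dx, dy in directions]
--
-- def generate_signals_from_multiple_cells(cells):
--     return sum([generate_signals_for_a_cell(cell) for cell in cells], [])
--
-- def count_cell_signals(signals):
--     return {signal: signals.count(signal) for signal in signals}
--
-- def next_generation(live_cells):
--     signal_counts = count_cell_signals(generate_signals_from_multiple_cells(live_cells))
--
--     def cell_lives(cell, number_of_life_neighbors):
--         return next_state(CellState.ALIVE if cell in live_cells else CellState.DEAD, number_of_life_neighbors) == CellState.ALIVE
--
--     return {cell for cell, count in signal_counts.items() if cell_lives(cell, count)}
--
-- def simulate_until_extinction(live_cells, max_iterations=1000):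
--     iteration = 0
--     current = live_cells
--     while current and iteration < max_iterations:
--         next_gen_cells = next_generation(current)
--         if next_gen_cells == current:
--             break
--         current = next_gen_cells
--         iteration += 1
--     return current, iteration
-- ===== SOURCE B (Python) =====
-- _DIRECTIONS = ((-1, -1), (-1, 0), (-1, 1), (0, -1), (0, 1), (1, -1), (1, 0), (1, 1))
--
-- def _live_neighbors(cells, cell):
--     x, y = cell
--     return sum(((x + dx, y + dy) in cells) for dx, dy in _DIRECTIONS)
--
-- def _candidates(cells):
--     seen = set()
--     for x, y in cells:
--         for dx, dy in _DIRECTIONS: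
--             seen.add((x + dx, y + dy))
--     return seen
--
-- def _step(cells):
--     return {c for c in _candidates(cells)
--             if _live_neighbors(cells, c) == 3
--             or (_live_neighbors(cells, c) == 2 and c in cells)}
--
-- def simulate_until_extinction(live_cells, max_iterations=1000):
--     current = live_cells
--     iteration = 0
--     while current and iteration < max_iterations:
--         nxt = _step(current)
--         if nxt == current:
--             break
--         current = nxt
--         iteration += 1
--     return current, iteration
-- ===== Notes on version B (the rewrite author's own statement) =====
-- stated objective: faster
-- what changed: A scatters 8 signals per live cell into one big list and tallies each signal with a quadratic signals.count scan; B never builds a signal multiset: it gathers, for each candidate cell (union of the live cells' neighbourhoods), its live-neighbour count directly by 8 set-membership tests.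
import Mathlib
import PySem

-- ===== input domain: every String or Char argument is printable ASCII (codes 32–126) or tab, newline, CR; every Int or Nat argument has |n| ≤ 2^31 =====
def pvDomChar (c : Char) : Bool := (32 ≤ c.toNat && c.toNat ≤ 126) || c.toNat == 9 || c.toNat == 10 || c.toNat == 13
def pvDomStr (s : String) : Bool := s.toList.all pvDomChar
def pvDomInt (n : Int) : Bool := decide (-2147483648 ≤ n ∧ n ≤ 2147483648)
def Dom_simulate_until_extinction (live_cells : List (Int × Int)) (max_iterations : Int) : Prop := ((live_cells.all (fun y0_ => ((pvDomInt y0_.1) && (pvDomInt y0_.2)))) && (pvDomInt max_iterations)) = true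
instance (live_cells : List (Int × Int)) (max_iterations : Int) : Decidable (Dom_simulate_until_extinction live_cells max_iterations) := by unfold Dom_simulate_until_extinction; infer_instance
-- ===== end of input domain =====

-- B replaces A's scatter-and-count step (emit 8 signals per live cell, tally each signal by a
-- quadratic signals.count scan) by a gather step: for each candidate cell it counts its live
-- neighbours directly by 8 membership tests in the live set — no signal multiset, no counting dict.

-- ===== PORT A =====
inductive CellState
  | alive
  | dead
deriving DecidableEq, Repr

def next_state (current_state : CellState) (number_of_life_neighbors : Int) : CellState :=
  if number_of_life_neighbors == 3 || (current_state == CellState.alive && number_of_life_neighbors == 2) then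
    CellState.alive
  else
    CellState.dead

def pyDirections : List (Int × Int) :=
  [(-1, -1), (-1, 0), (-1, 1), (0, -1), (0, 1), (1, -1), (1, 0), (1, 1)]

def generate_signals_for_a_cell (cell : Int × Int) : List (Int × Int) :=
  pyDirections.map (fun d => (cell.1 + d.1, cell.2 + d.2))

-- sum([...], []) : left fold of ++ over the per-cell lists
def generate_signals_from_multiple_cells (cells : List (Int × Int)) : List (Int × Int) :=
  (cells.map generate_signals_for_a_cell).foldl (· ++ ·) []

-- {signal: signals.count(signal) for signal in signals}
def count_cell_signals (signals : List (Int × Int)) : PySem.Dict (Int × Int) Int :=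
  signals.foldl (fun d s => d.insert s (signals.count s : Int)) PySem.Dict.empty

def cell_lives (live_cells : List (Int × Int)) (cell : Int × Int) (n : Int) : Bool :=
  next_state (if live_cells.contains cell then CellState.alive else CellState.dead) n == CellState.alive

def next_generation (live_cells : List (Int × Int)) : List (Int × Int) :=
  let signal_counts := count_cell_signals (generate_signals_from_multiple_cells live_cells)
  PySem.Set.ofList
    (((signal_counts.items.filter (fun p => cell_lives live_cells p.1 p.2)).map (·.1)))

-- the while loop, fueled by the number of remaining allowed iterations
def simLoopA (fuel : Nat) (current : List (Int × Int)) (iteration : Int) : (List (Int × Int)) × Int :=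
  match fuel with
  | 0 => (current, iteration)
  | f + 1 =>
    if current.isEmpty then (current, iteration)
    else
      let next_gen_cells := next_generation current
      if PySem.Set.equal next_gen_cells current then (current, iteration)
      else simLoopA f next_gen_cells (iteration + 1)

def simulate_until_extinction (live_cells : List (Int × Int)) (max_iterations : Int) : (List (Int × Int)) × Int :=
  simLoopA max_iterations.toNat live_cells 0

-- ===== PORT B =====
def altDirections : List (Int × Int) :=
  [(-1, -1), (-1, 0), (-1, 1), (0, -1), (0, 1), (1, -1), (1, 0), (1, 1)]

-- sum(((x+dx, y+dy) in cells) for dx, dy in _DIRECTIONS): 8 membership tests in the live set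
def altNeighbors (cells : List (Int × Int)) (cell : Int × Int) : Int :=
  (altDirections.map (fun d => if cells.contains (cell.1 + d.1, cell.2 + d.2) then (1 : Int) else 0)).sum

-- seen.add((x+dx, y+dy)) over all live cells: the candidate set
def altCandidates (cells : List (Int × Int)) : PySem.Set (Int × Int) :=
  cells.foldl (fun s c => altDirections.foldl (fun s d => PySem.Set.add s (c.1 + d.1, c.2 + d.2)) s)
    PySem.Set.empty

def altStep (cells : List (Int × Int)) : List (Int × Int) :=
  PySem.Set.ofList ((altCandidates cells).filter
    (fun c => altNeighbors cells c == 3 || (altNeighbors cells c == 2 && cells.contains c)))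

def simLoopB (fuel : Nat) (current : List (Int × Int)) (iteration : Int) : (List (Int × Int)) × Int :=
  match fuel with
  | 0 => (current, iteration)
  | f + 1 =>
    if current.isEmpty then (current, iteration)
    else
      let nxt := altStep current
      if PySem.Set.equal nxt current then (current, iteration)
      else simLoopB f nxt (iteration + 1)

def simulate_until_extinction_alt (live_cells : List (Int × Int)) (max_iterations : Int) : (List (Int × Int)) × Int :=
  simLoopB max_iterations.toNat live_cells 0

-- ===== PRECONDITION & SPEC =====
-- live_cells is a Python SET (py_type set[tuple[int,int]]), ported per the convention as the list
-- of its DISTINCT elements; Pre_ states exactly that representation invariant (no duplicates) —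
-- a list with duplicates corresponds to no Python input of this function.
def Pre_simulate_until_extinction (live_cells : List (Int × Int)) (max_iterations : Int) : Prop :=
  live_cells.Nodup
instance (live_cells : List (Int × Int)) (max_iterations : Int) : Decidable (Pre_simulate_until_extinction live_cells max_iterations) := by unfold Pre_simulate_until_extinction; infer_instance

def pvWitness_simulate_until_extinction : (List (Int × Int)) × Int := ([(0, 0), (1, 0), (0, 1)], 5)

def Spec_simulate_until_extinction (live_cells : List (Int × Int)) (max_iterations : Int) (out : (List (Int × Int)) × Int) : Prop := out = simulate_until_extinction_alt live_cells max_iterations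
instance (live_cells : List (Int × Int)) (max_iterations : Int) (out : (List (Int × Int)) × Int) : Decidable (Spec_simulate_until_extinction live_cells max_iterations out) := by unfold Spec_simulate_until_extinction; infer_instance

-- ===== CLAIM (what is proved, stated in full; the proofs are below) =====
def Claim_equal_simulate_until_extinction : Prop := ∀ (live_cells : List (Int × Int)) (max_iterations : Int), Dom_simulate_until_extinction live_cells max_iterations → Pre_simulate_until_extinction live_cells max_iterations → Spec_simulate_until_extinction live_cells max_iterations (simulate_until_extinction live_cells max_iterations)

-- ===== LEMMAS AND PROOFS =====

-- B's direction table is A's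
theorem altDirections_eq : altDirections = pyDirections := rfl

-- a fold over nested lists is the fold over the flattened list
theorem foldl_nested {α β γ : Type} (g : α → List β) (step : γ → β → γ)
    (l : List α) (init : γ) :
    l.foldl (fun d x => (g x).foldl step d) init = (l.flatMap g).foldl step init := by
  induction l generalizing init with
  | nil => rfl
  | cons x t ih => simp [List.flatMap_cons, List.foldl_append, ih]

-- lookup in A's comprehension dict: repeated insert of (s, f s)
theorem getD_foldl_insert_fn (f : Int × Int → Int) (xs : List (Int × Int))
    (d : PySem.Dict (Int × Int) Int) (k : Int × Int) (d0 : Int) :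
    (xs.foldl (fun d s => d.insert s (f s)) d).getD k d0 =
      if k ∈ xs then f k else d.getD k d0 := by
  induction xs generalizing d with
  | nil => simp
  | cons x t ih =>
    simp only [List.foldl_cons, ih, List.mem_cons, PySem.Dict.getD_insert]
    by_cases hk : k ∈ t
    · simp [hk]
    · by_cases hx : k = x <;> simp [hk, hx]

-- A's comprehension dict has the same items as Counter(signals)
theorem count_cell_signals_eq_counter (signals : List (Int × Int)) :
    count_cell_signals signals = PySem.Dict.counter signals := by
  apply PySem.Dict.ext
  rw [PySem.Dict.items_counter]
  have hnd : (count_cell_signals signals).keys.Nodup := by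
    unfold count_cell_signals
    exact PySem.Dict.nodup_keys_foldl_insert _ _ _ (by simp)
  rw [PySem.Dict.items_eq_map_keys _ hnd 0]
  have hkeys : (count_cell_signals signals).keys = PySem.Set.ofList signals := by
    unfold count_cell_signals
    rw [PySem.Dict.keys_foldl_insert]
    rfl
  rw [hkeys]
  apply List.map_congr_left
  intro k hk
  unfold count_cell_signals
  rw [getD_foldl_insert_fn]
  have hmem : k ∈ signals := by simpa [PySem.Set.mem_ofList] using hk
  simp [hmem]

-- the two liveness tests agree
theorem cell_lives_eq (live_cells : List (Int × Int)) (cell : Int × Int) (n : Int) :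
    cell_lives live_cells cell n = (n == 3 || (n == 2 && live_cells.contains cell)) := by
  unfold cell_lives next_state
  by_cases h3 : n = 3
  · simp [h3]
  · have e3 : (n == 3) = false := beq_eq_false_iff_ne.mpr h3
    by_cases h2 : n = 2
    · by_cases hm : cell ∈ live_cells <;> simp [h2, hm]
    · have e2 : (n == 2) = false := beq_eq_false_iff_ne.mpr h2
      by_cases hm : cell ∈ live_cells <;> simp [e3, e2, hm]

-- the signals of one cell contain k once iff k - c is a direction
set_option maxHeartbeats 1000000 in
theorem gen_count (c k : Int × Int) :
    (generate_signals_for_a_cell c).count k =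
      if (k.1 - c.1, k.2 - c.2) ∈ pyDirections then 1 else 0 := by
  rcases c with ⟨cx, cy⟩
  rcases k with ⟨kx, ky⟩
  simp only [generate_signals_for_a_cell, pyDirections, List.map_cons, List.map_nil,
    List.count_cons, List.count_nil, List.mem_cons, List.not_mem_nil, beq_iff_eq, Prod.mk.injEq,
    or_false]
  split_ifs <;> omega

-- A's multiplicity of signal k = how many cells have k as a neighbour
theorem countA (cells : List (Int × Int)) (k : Int × Int) :
    (cells.flatMap generate_signals_for_a_cell).count k =
      cells.countP (fun c => decide ((k.1 - c.1, k.2 - c.2) ∈ pyDirections)) := by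
  induction cells with
  | nil => simp
  | cons c t ih =>
    rw [List.flatMap_cons, List.count_append, List.countP_cons, ih, gen_count]
    by_cases h : (k.1 - c.1, k.2 - c.2) ∈ pyDirections <;> simp [h] <;> omega

-- splitting one membership test over a fresh head
theorem ite_mem_cons (c : Int × Int) (t : List (Int × Int)) (hc : c ∉ t) (x : Int × Int) :
    (if x ∈ c :: t then (1 : Int) else 0) =
      (if x = c then 1 else 0) + (if x ∈ t then 1 else 0) := by
  by_cases hx : x = c
  · subst hx; simp [hc]
  · simp [hx]

-- the eight "is this direction the one pointing at c" tests sum to one membership test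
set_option maxHeartbeats 1000000 in
theorem sum_hits_head (c k : Int × Int) :
    ((pyDirections.map (fun d => if (k.1 + d.1, k.2 + d.2) = c then (1 : Int) else 0)).sum) =
      if (k.1 - c.1, k.2 - c.2) ∈ pyDirections then 1 else 0 := by
  rcases c with ⟨cx, cy⟩
  rcases k with ⟨kx, ky⟩
  simp only [pyDirections, List.map_cons, List.map_nil, List.sum_cons, List.sum_nil,
    List.mem_cons, List.not_mem_nil, Prod.mk.injEq, or_false]
  split_ifs <;> omega

-- B's gathered neighbour count = A's signal multiplicity (live set has no duplicates)
theorem countB (cells : List (Int × Int)) (h : cells.Nodup) (k : Int × Int) :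
    altNeighbors cells k =
      (cells.countP (fun c => decide ((k.1 - c.1, k.2 - c.2) ∈ pyDirections)) : Int) := by
  induction cells with
  | nil => simp [altNeighbors]
  | cons c t ih =>
    rcases List.nodup_cons.mp h with ⟨hc, ht⟩
    have hsplit : altNeighbors (c :: t) k =
        ((pyDirections.map (fun d => if (k.1 + d.1, k.2 + d.2) = c then (1 : Int) else 0)).sum) +
          altNeighbors t k := by
      unfold altNeighbors
      rw [altDirections_eq, ← List.sum_map_add]
      apply congrArg List.sum
      apply List.map_congr_left
      intro d _
      simp only [List.contains_eq_mem, decide_eq_true_eq, List.mem_cons]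
      rw [show (if (k.1 + d.1, k.2 + d.2) = c ∨ (k.1 + d.1, k.2 + d.2) ∈ t then (1:Int) else 0) =
            (if (k.1 + d.1, k.2 + d.2) ∈ c :: t then (1:Int) else 0) by simp [List.mem_cons]]
      exact ite_mem_cons c t hc _
    rw [hsplit, sum_hits_head, ih ht, List.countP_cons]
    by_cases hd : (k.1 - c.1, k.2 - c.2) ∈ pyDirections <;> simp [hd] <;> ring
 
-- neighbour counts agree
theorem neighbors_eq (cells : List (Int × Int)) (h : cells.Nodup) (k : Int × Int) :
    altNeighbors cells k = ((cells.flatMap generate_signals_for_a_cell).count k : Int) := by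
  rw [countA, countB cells h k]

-- B's candidate set is the deduplicated signal list
theorem candidates_eq (cells : List (Int × Int)) :
    altCandidates cells = PySem.Set.ofList (cells.flatMap generate_signals_for_a_cell) := by
  unfold altCandidates
  rw [altDirections_eq, PySem.Set.ofList_eq_foldl, ← foldl_nested (g := generate_signals_for_a_cell)]
  apply PySem.List.foldl_congr_mem
  intro s c _
  unfold generate_signals_for_a_cell
  rw [List.foldl_map]

-- one generation: A's step equals B's step on a duplicate-free live set
theorem step_eq (cells : List (Int × Int)) (h : cells.Nodup) :
    next_generation cells = altStep cells := by
  unfold next_generation altStep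
  have hsig : generate_signals_from_multiple_cells cells =
      cells.flatMap generate_signals_for_a_cell := by
    unfold generate_signals_from_multiple_cells
    rw [PySem.List.foldl_append_eq_flatten]
    simp [List.flatMap]
  simp only [hsig, count_cell_signals_eq_counter, candidates_eq, PySem.Dict.items_counter,
    List.filter_map, List.map_map]
  have hid : ((fun p : (Int × Int) × Int => p.1) ∘
      fun k => (k, ((cells.flatMap generate_signals_for_a_cell).count k : Int))) = id := rfl
  rw [hid, List.map_id]
  apply congrArg PySem.Set.ofList
  apply List.filter_congr
  intro k _
  simp only [Function.comp_apply, cell_lives_eq, neighbors_eq cells h k]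

-- the two loops agree as long as the current generation has no duplicates
theorem loop_eq (fuel : Nat) (current : List (Int × Int)) (iteration : Int)
    (h : current.Nodup) :
    simLoopA fuel current iteration = simLoopB fuel current iteration := by
  induction fuel generalizing current iteration with
  | zero => rfl
  | succ f ih =>
    simp only [simLoopA, simLoopB, step_eq current h]
    split_ifs with h1 h2
    · rfl
    · rfl
    · exact ih _ _ (by unfold altStep; exact PySem.Set.nodup_ofList _)

-- ===== VERDICT (by name: the statement is the Claim_ definition above) =====
theorem simulate_until_extinction_spec : Claim_equal_simulate_until_extinction := by
  intro live_cells max_iterations _ hpre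
  unfold Spec_simulate_until_extinction simulate_until_extinction simulate_until_extinction_alt
  exact loop_eq _ _ _ hpre
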